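-- pv_equiv track=rewrite | github.com/rahuldave/rahuldave.github.io | _scripts/add_notebook_format.py | add_format_to_frontmatter
-- ===== SOURCE A (Python) =====
-- FORMAT_LINES = [
--     "format:\n",
--     "    html: default\n",
--     "    ipynb: default\n",
-- ]
--
-- def add_format_to_frontmatter(source_lines):
--     """Insert format block into frontmatter source lines.
--
--     Handles both formats: source as a list of individual lines,
--     or source as a single string with embedded newlines.
--
--     Returns (new_lines, changed) where changed is True if modification was made.
--     """
--     text = "".join(source_lines)
--     if "\nformat:" in text or text.startswith("format:"):
--         return source_lines, False
--
--     # Split into actual lines, preserving newlines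
--     lines = text.splitlines(keepends=True)
--     # Last line may lack trailing newline (e.g. "---")
--     if lines and not lines[-1].endswith("\n"):
--         lines[-1] += "\n"
--
--     # Find closing --- and insert format block before it
--     new_lines = []
--     inserted = False
--     for line in lines:
--         if line.rstrip() == "---" and not inserted and new_lines:
--             new_lines.extend(FORMAT_LINES)
--             inserted = True
--         new_lines.append(line)
--
--     if not inserted:
--         return source_lines, False
--
--     return new_lines, True
-- ===== SOURCE B (Python) =====
-- FORMAT_LINES = [
--     "format:\n",
--     "    html: default\n",
--     "    ipynb: default\n",
-- ]
--
-- FORMAT_BLOCK = "".join(FORMAT_LINES)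
--
--
-- def add_format_to_frontmatter(source_lines):
--     """Insert format block into frontmatter source lines.
--
--     Works on the flat text with character offsets: normalises the trailing
--     newline on the text itself, scans for the offset of the closing '---'
--     line, splices the format block into the string there, and splits into
--     lines only once at the very end.
--     """
--     text = "".join(source_lines)
--     if "\nformat:" in text or text.startswith("format:"):
--         return source_lines, False
--
--     if text and not text.endswith("\n"):
--         text += "\n"
--
--     n = len(text)
--     pos = 0
--     first = True
--     while pos < n:
--         j = pos
--         while j < n and text[j] != "\n" and text[j] != "\r":
--             j += 1
--         if not first and text[pos:j].rstrip() == "---":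
--             new_text = text[:pos] + FORMAT_BLOCK + text[pos:]
--             return new_text.splitlines(keepends=True), True
--         first = False
--         pos = j + (2 if text[j:j + 2] == "\r\n" else 1)
--     return source_lines, False
-- ===== Notes on version B (the rewrite author's own statement) =====
-- stated objective: alternative
-- what changed: B never builds a line list to decide: it works on the flat joined string with character offsets, scanning raw characters for the start offset of the closing '---' line, splicing the format block into the string at that offset, and splitting into keepends lines only once at the very end; A splits into lines first and rebuilds the list in a loop with an inserted flag.
import Mathlib
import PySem

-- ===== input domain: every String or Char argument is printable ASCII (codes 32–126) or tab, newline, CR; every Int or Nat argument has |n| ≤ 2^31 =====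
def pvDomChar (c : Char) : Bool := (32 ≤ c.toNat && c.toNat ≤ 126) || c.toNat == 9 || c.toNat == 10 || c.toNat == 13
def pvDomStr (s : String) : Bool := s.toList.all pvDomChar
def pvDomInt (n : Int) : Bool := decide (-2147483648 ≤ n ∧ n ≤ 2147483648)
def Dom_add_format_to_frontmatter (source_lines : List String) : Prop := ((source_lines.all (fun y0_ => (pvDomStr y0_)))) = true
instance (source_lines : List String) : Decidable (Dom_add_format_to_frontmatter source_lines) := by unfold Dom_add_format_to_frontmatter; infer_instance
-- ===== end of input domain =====

-- B works on the flat joined string with character offsets (scan for the offset of the closing '---'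
-- line, splice the block into the string there, split into lines once at the end) instead of A's
-- line-list loop with an inserted flag: a different representation of the same task, not claimed faster.

-- ===== PORT A =====
def pvFormatLines : List String := ["format:\n", "    html: default\n", "    ipynb: default\n"]

-- text.splitlines(keepends=True), hand-ported: exact on the stated domain, where the only
-- line breaks that can occur are '\n', '\r\n' and '\r' (tab is not a line break).
def pvSplitKeepAux (acc : List Char) : List Char → List (List Char)
  | [] => if acc.isEmpty then [] else [acc.reverse]
  | c :: rest =>
    if c = '\n' then (acc.reverse ++ ['\n']) :: pvSplitKeepAux [] rest
    else if c = '\r' then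
      if rest.head? = some '\n' then (acc.reverse ++ ['\r', '\n']) :: pvSplitKeepAux [] rest.tail
      else (acc.reverse ++ ['\r']) :: pvSplitKeepAux [] rest
    else pvSplitKeepAux (c :: acc) rest
termination_by l => l.length
decreasing_by
  all_goals simp_all [List.length_tail, List.length_cons]

def pvSplitKeep (s : String) : List String :=
  (pvSplitKeepAux [] s.toList).map String.ofList

-- `if lines and not lines[-1].endswith("\n"): lines[-1] += "\n"`
def pvFixLast (lines : List String) : List String :=
  match lines.getLast? with
  | none => lines
  | some last =>
    if PySem.Str.endswith last "\n" then lines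
    else lines.dropLast ++ [String.ofList (last.toList ++ ['\n'])]

-- A's for-loop with its new_lines accumulator and inserted flag
def pvLoopA : List String → List String → Bool → List String × Bool
  | [], acc, ins => (acc, ins)
  | l :: rest, acc, ins =>
    if (PySem.Str.rstrip l == "---") && !ins && !acc.isEmpty then
      pvLoopA rest ((acc ++ pvFormatLines) ++ [l]) true
    else
      pvLoopA rest (acc ++ [l]) ins

def add_format_to_frontmatter (source_lines : List String) : List String × Bool :=
  let text := PySem.Str.join "" source_lines
  if PySem.Str.isIn "\nformat:" text || PySem.Str.startswith text "format:" then
    (source_lines, false)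
  else
    let lines := pvFixLast (pvSplitKeep text)
    let r := pvLoopA lines [] false
    if !r.2 then (source_lines, false) else (r.1, true)

-- ===== PORT B =====
-- FORMAT_BLOCK = "".join(FORMAT_LINES)
def pvFormatBlock : String := PySem.Str.join "" pvFormatLines

def pvNotBrk (c : Char) : Bool := !(c == '\n' || c == '\r')

-- `pos = j + (2 if text[j:j+2] == "\r\n" else 1)`: the length of the line terminator at rest1;
-- [] gives 0 (python adds 1 there, but then pos > n and its loop exits — same 'not found' result).
def pvTermLen (l : List Char) : Nat :=
  match l with
  | [] => 0
  | c :: rest => if c = '\r' then (match rest with | '\n' :: _ => 2 | _ => 1) else 1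

theorem pvTermLen_pos (c : Char) (cs : List Char) : 1 ≤ pvTermLen (c :: cs) := by
  simp only [pvTermLen]
  split
  · split <;> omega
  · omega

-- decrease measure of B's scan loop (cited by pvScanB's decreasing_by)
theorem pv_scan_dec (c : Char) (cs : List Char) :
    (((c :: cs).dropWhile pvNotBrk).drop (pvTermLen ((c :: cs).dropWhile pvNotBrk))).length
      < (c :: cs).length := by
  by_cases h : pvNotBrk c = true
  · have h1 : (List.dropWhile pvNotBrk cs).length ≤ cs.length := List.length_dropWhile_le _ _
    have h2 : List.dropWhile pvNotBrk (c :: cs) = List.dropWhile pvNotBrk cs := by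
      rw [List.dropWhile_cons]; simp [h]
    rw [h2]
    simp only [List.length_drop, List.length_cons]
    omega
  · have h0 : pvNotBrk c = false := by simpa using h
    have h2 : List.dropWhile pvNotBrk (c :: cs) = c :: cs := by
      rw [List.dropWhile_cons]; simp [h0]
    rw [h2]
    have h3 := pvTermLen_pos c cs
    simp only [List.length_drop, List.length_cons]
    omega

-- B's while loop: rem = text[pos:]; the inner `while j < n and ...` is the takeWhile, the slice
-- text[pos:j] is that takeWhile (= body), and the new pos skips the body plus the terminator.
def pvScanB : List Char → Nat → Bool → Option Nat
  | [], _, _ => none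
  | c :: cs, pos, first =>
    let body := (c :: cs).takeWhile pvNotBrk
    let rest1 := (c :: cs).dropWhile pvNotBrk
    if !first && (PySem.Str.rstrip (String.ofList body) == "---") then some pos
    else pvScanB (rest1.drop (pvTermLen rest1)) (pos + body.length + pvTermLen rest1) false
termination_by l _ _ => l.length
decreasing_by
  exact pv_scan_dec _ _

def add_format_to_frontmatter_alt (source_lines : List String) : List String × Bool :=
  let text0 := PySem.Str.join "" source_lines
  if PySem.Str.isIn "\nformat:" text0 || PySem.Str.startswith text0 "format:" then
    (source_lines, false)
  else
    -- `if text and not text.endswith("\n"): text += "\n"`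
    let text := if !(text0 == "") && !(PySem.Str.endswith text0 "\n")
                then String.ofList (text0.toList ++ ['\n']) else text0
    match pvScanB text.toList 0 true with
    | none => (source_lines, false)
    | some p =>
      -- text[:p] / text[p:] with 0 ≤ p ≤ len(text) are take/drop
      (pvSplitKeep (String.ofList (text.toList.take p ++ pvFormatBlock.toList ++ text.toList.drop p)),
       true)

-- ===== PRECONDITION & SPEC =====
def Spec_add_format_to_frontmatter (source_lines : List String) (out : List String × Bool) : Prop := out = add_format_to_frontmatter_alt source_lines
instance (source_lines : List String) (out : List String × Bool) : Decidable (Spec_add_format_to_frontmatter source_lines out) := by unfold Spec_add_format_to_frontmatter; infer_instance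

-- ===== CLAIM (what is proved, stated in full; the proofs are below) =====
def Claim_equal_add_format_to_frontmatter : Prop := ∀ (source_lines : List String), Dom_add_format_to_frontmatter source_lines → Spec_add_format_to_frontmatter source_lines (add_format_to_frontmatter source_lines)

-- ===== LEMMAS AND PROOFS =====

-- chunk anatomy: body = maximal run of non-break chars, term = the rest (the line terminator)
def pvBody (l : List Char) : List Char := l.takeWhile pvNotBrk
def pvTerm (l : List Char) : List Char := l.dropWhile pvNotBrk
def pvChunkOk (l : List Char) : Bool :=
  (pvTerm l == ['\n']) || (pvTerm l == ['\r', '\n']) || (pvTerm l == ['\r'])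
def pvNoLF (L : List (List Char)) : Bool :=
  match L with
  | (c :: _) :: _ => !(c == '\n')
  | _ => true
def pvChain : List (List Char) → Bool
  | [] => true
  | l :: rest => pvChunkOk l && (!(pvTerm l == ['\r']) || pvNoLF rest) && pvChain rest
def pvLastOk (l : List Char) : Bool := pvChunkOk l || (!l.isEmpty && l.all pvNotBrk)
def pvChain' : List (List Char) → Bool
  | [] => true
  | [l] => pvLastOk l
  | l :: rest => pvChunkOk l && (!(pvTerm l == ['\r']) || pvNoLF rest) && pvChain' rest
def pvCharFix (L : List (List Char)) : List (List Char) :=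
  match L.getLast? with
  | none => L
  | some last =>
    if PySem.Chars.endswith last ['\n'] then L else L.dropLast ++ [last ++ ['\n']]
def pvCond (l : List Char) : Bool := PySem.Str.rstrip (String.ofList l) == "---"
def pvFmtChunks : List (List Char) := pvFormatLines.map String.toList

-- small helpers
theorem pvNotBrk_lf : pvNotBrk '\n' = false := by decide
theorem pvNotBrk_cr : pvNotBrk '\r' = false := by decide

theorem pv_or_elim {a b : Bool} (h : (a || b) = true) : a = true ∨ b = true := by
  cases a <;> simp_all

theorem pv_and_elim {a b : Bool} (h : (a && b) = true) : a = true ∧ b = true := by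
  cases a <;> simp_all

theorem pv_dropLast_single {α : Type} (a : α) : ([a] : List α).dropLast = [] := rfl

-- unfolding helpers for pvSplitKeepAux
theorem pv_splitAux_lf (acc rest : List Char) :
    pvSplitKeepAux acc ('\n' :: rest) = (acc.reverse ++ ['\n']) :: pvSplitKeepAux [] rest := by
  simp [pvSplitKeepAux]

theorem pv_splitAux_crlf (acc rest : List Char) :
    pvSplitKeepAux acc ('\r' :: '\n' :: rest) = (acc.reverse ++ ['\r', '\n']) :: pvSplitKeepAux [] rest := by
  simp [pvSplitKeepAux]

theorem pv_splitAux_cr_nil (acc : List Char) :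
    pvSplitKeepAux acc ['\r'] = [acc.reverse ++ ['\r']] := by
  simp [pvSplitKeepAux]

theorem pv_splitAux_cr_cons {c : Char} (acc t : List Char) (h : ¬(c = '\n')) :
    pvSplitKeepAux acc ('\r' :: c :: t) = (acc.reverse ++ ['\r']) :: pvSplitKeepAux [] (c :: t) := by
  simp [pvSplitKeepAux, h]

theorem pv_splitAux_other {c : Char} (acc rest : List Char) (h1 : ¬(c = '\n')) (h2 : ¬(c = '\r')) :
    pvSplitKeepAux acc (c :: rest) = pvSplitKeepAux (c :: acc) rest := by
  simp [pvSplitKeepAux, h1, h2]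

-- generic takeWhile/dropWhile append facts
theorem pv_takeWhile_append {α : Type} (p : α → Bool) (xs ys : List α) (h : xs.all p = true) :
    (xs ++ ys).takeWhile p = xs ++ ys.takeWhile p := by
  induction xs with
  | nil => simp
  | cons a l ih => simp_all

theorem pv_dropWhile_append {α : Type} (p : α → Bool) (xs ys : List α) (h : xs.all p = true) :
    (xs ++ ys).dropWhile p = ys.dropWhile p := by
  induction xs with
  | nil => simp
  | cons a l ih => simp_all

theorem pv_body_all (l : List Char) : (pvBody l).all pvNotBrk = true := by
  induction l with
  | nil => rfl
  | cons a t ih =>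
    by_cases h : pvNotBrk a = true
    · simp_all [pvBody]
    · simp [pvBody, (by simpa using h : pvNotBrk a = false)]

theorem pv_term_cases {l : List Char} (h : pvChunkOk l = true) :
    pvTerm l = ['\n'] ∨ pvTerm l = ['\r', '\n'] ∨ pvTerm l = ['\r'] := by
  simpa [pvChunkOk, or_assoc] using h

theorem pv_chunkOk_ne_nil {l : List Char} (h : pvChunkOk l = true) : l ≠ [] := by
  intro hnil; subst hnil; exact absurd h (by decide)

theorem pvLastOk_ne_nil {l : List Char} (h : pvLastOk l = true) : l ≠ [] := by
  intro hnil; subst hnil; exact absurd h (by decide)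

-- chain intro/elim
theorem pv_chain_cons_intro (l : List Char) (R : List (List Char))
    (h1 : pvChunkOk l = true) (h2 : (!(pvTerm l == ['\r']) || pvNoLF R) = true)
    (h3 : pvChain R = true) : pvChain (l :: R) = true := by
  simp only [pvChain, Bool.and_eq_true]
  exact ⟨⟨h1, h2⟩, h3⟩

theorem pv_chain_cons_elim {l : List Char} {R : List (List Char)}
    (h : pvChain (l :: R) = true) :
    pvChunkOk l = true ∧ (!(pvTerm l == ['\r']) || pvNoLF R) = true ∧ pvChain R = true := by
  simp only [pvChain, Bool.and_eq_true] at h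
  exact ⟨h.1.1, h.1.2, h.2⟩

theorem pv_chain'_cons_cons_elim {l x : List Char} {xs : List (List Char)}
    (h : pvChain' (l :: x :: xs) = true) :
    pvChunkOk l = true ∧ (!(pvTerm l == ['\r']) || pvNoLF (x :: xs)) = true
      ∧ pvChain' (x :: xs) = true := by
  simp only [pvChain', Bool.and_eq_true] at h
  exact ⟨h.1.1, h.1.2, h.2⟩

theorem pv_chain'_singleton_elim {l : List Char} (h : pvChain' [l] = true) :
    pvLastOk l = true := by
  simpa [pvChain'] using h

theorem pv_chain_ne_nil {L : List (List Char)} (h : pvChain L = true) : ∀ l ∈ L, l ≠ [] := by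
  induction L with
  | nil => intro l hl; simp at hl
  | cons x R ih =>
    obtain ⟨h1, _, h3⟩ := pv_chain_cons_elim h
    intro l hl
    rcases List.mem_cons.mp hl with rfl | hm
    · exact pv_chunkOk_ne_nil h1
    · exact ih h3 l hm

theorem pv_chain'_ne_nil {L : List (List Char)} (h : pvChain' L = true) : ∀ l ∈ L, l ≠ [] := by
  induction L with
  | nil => intro l hl; simp at hl
  | cons x R ih =>
    intro l hl
    cases R with
    | nil =>
      have hlo := pv_chain'_singleton_elim h
      rcases List.mem_cons.mp hl with rfl | hm
      · exact pvLastOk_ne_nil hlo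
      · simp at hm
    | cons y ys =>
      obtain ⟨h1, _, h3⟩ := pv_chain'_cons_cons_elim h
      rcases List.mem_cons.mp hl with rfl | hm
      · exact pv_chunkOk_ne_nil h1
      · exact ih h3 l hm

theorem pvNoLF_cons (c : Char) (r : List Char) (R : List (List Char)) :
    pvNoLF ((c :: r) :: R) = !(c == '\n') := rfl

theorem pvNoLF_nil_chunk (R : List (List Char)) : pvNoLF ([] :: R) = true := rfl

theorem pvNoLF_indep (g : List Char) (X Y : List (List Char)) :
    pvNoLF (g :: X) = pvNoLF (g :: Y) := by
  cases g with
  | nil => rfl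
  | cons c t => rfl

-- flatten of splitlines round-trips to the text
theorem pv_flatten_splitAux (acc cs : List Char) :
    (pvSplitKeepAux acc cs).flatten = acc.reverse ++ cs := by
  fun_induction pvSplitKeepAux acc cs with
  | case1 acc hemp => simp_all [List.isEmpty_iff]
  | case2 acc hne => simp
  | case3 acc rest ih => simp_all
  | case4 acc rest hhead ih =>
    cases rest with
    | nil => simp at hhead
    | cons d t =>
      have hd : d = '\n' := by simpa using hhead
      subst hd
      simp_all
  | case5 acc rest hhead hneq ih => simp_all
  | case6 acc c rest h1 h2 ih => simp_all

-- shape: the first produced chunk extends acc.reverse with a prefix of the input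
theorem pv_splitAux_shape (acc cs : List Char) :
    pvSplitKeepAux acc cs = [] ∨
      ∃ r tl, pvSplitKeepAux acc cs = (acc.reverse ++ r) :: tl ∧ r <+: cs := by
  fun_induction pvSplitKeepAux acc cs with
  | case1 acc hemp => exact Or.inl rfl
  | case2 acc hne => exact Or.inr ⟨[], [], by simp, List.nil_prefix⟩
  | case3 acc rest ih => exact Or.inr ⟨['\n'], _, rfl, ⟨rest, rfl⟩⟩
  | case4 acc rest hhead ih =>
    cases rest with
    | nil => simp at hhead
    | cons d t =>
      have hd : d = '\n' := by simpa using hhead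
      subst hd
      exact Or.inr ⟨['\r', '\n'], _, rfl, ⟨t, rfl⟩⟩
  | case5 acc rest hhead hneq ih => exact Or.inr ⟨['\r'], _, rfl, ⟨rest, rfl⟩⟩
  | case6 acc c rest h1 h2 ih =>
    rcases ih with hnil | ⟨r, tl, heq, hpre⟩
    · exact Or.inl hnil
    · refine Or.inr ⟨c :: r, tl, ?_, ?_⟩
      · rw [heq]; simp
      · obtain ⟨u, hu⟩ := hpre
        exact ⟨u, by simp [← hu]⟩

theorem pv_chain'_cons_intro (l : List Char) (T : List (List Char))
    (hok : pvChunkOk l = true)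
    (hadj : (!(pvTerm l == ['\r']) || pvNoLF T) = true)
    (hT : pvChain' T = true) : pvChain' (l :: T) = true := by
  cases T with
  | nil =>
    simp [pvChain', pvLastOk, hok]
  | cons t ts =>
    simp only [pvChain', Bool.and_eq_true]
    exact ⟨⟨hok, hadj⟩, hT⟩

-- raw splitlines output is an almost-chain
theorem pv_chain'_splitAux (acc cs : List Char) (hacc : acc.all pvNotBrk = true) :
    pvChain' (pvSplitKeepAux acc cs) = true := by
  fun_induction pvSplitKeepAux acc cs with
  | case1 acc hemp => rfl
  | case2 acc hne =>
    have hanil : acc ≠ [] := by simpa [List.isEmpty_iff] using hne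
    have h1 : acc.reverse.isEmpty = false := by simp [hanil]
    have h2 : acc.reverse.all pvNotBrk = true := by simpa using hacc
    simp [pvChain', pvLastOk, h1, h2]
  | case3 acc rest ih =>
    have hterm : pvTerm (acc.reverse ++ ['\n']) = ['\n'] := by
      unfold pvTerm
      rw [pv_dropWhile_append _ _ _ (by simpa using hacc)]
      decide
    have hok : pvChunkOk (acc.reverse ++ ['\n']) = true := by
      simp [pvChunkOk, hterm]
    exact pv_chain'_cons_intro _ _ hok (by rw [hterm]; rfl) (ih rfl)
  | case4 acc rest hhead hneq ih =>
    have hterm : pvTerm (acc.reverse ++ ['\r', '\n']) = ['\r', '\n'] := by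
      unfold pvTerm
      rw [pv_dropWhile_append _ _ _ (by simpa using hacc)]
      decide
    have hok : pvChunkOk (acc.reverse ++ ['\r', '\n']) = true := by
      simp [pvChunkOk, hterm]
    exact pv_chain'_cons_intro _ _ hok (by rw [hterm]; rfl) (ih rfl)
  | case5 acc rest hhead hneq ih =>
    have hterm : pvTerm (acc.reverse ++ ['\r']) = ['\r'] := by
      unfold pvTerm
      rw [pv_dropWhile_append _ _ _ (by simpa using hacc)]
      decide
    have hok : pvChunkOk (acc.reverse ++ ['\r']) = true := by
      simp [pvChunkOk, hterm]
    have hnolf : pvNoLF (pvSplitKeepAux [] rest) = true := by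
      rcases pv_splitAux_shape [] rest with hsh | ⟨r, tl, hsh, hpre⟩
      · rw [hsh]; rfl
      · have hsh' : pvSplitKeepAux [] rest = r :: tl := by simpa using hsh
        rw [hsh']
        cases r with
        | nil => exact pvNoLF_nil_chunk tl
        | cons rc rt =>
          obtain ⟨u, hu⟩ := hpre
          have hrc : ¬(rc = '\n') := by
            intro e
            subst e
            apply hhead
            rw [← hu]
            rfl
          rw [pvNoLF_cons]
          simp [hrc]
    refine pv_chain'_cons_intro _ _ hok ?_ (ih rfl)
    rw [hterm, Bool.or_eq_true]
    exact Or.inr hnolf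
  | case6 acc c rest h1 h2 ih =>
    refine ih ?_
    have hc : pvNotBrk c = true := by simp [pvNotBrk, h1, h2]
    simp [hc, hacc]

-- the fix of the last line turns an almost-chain into a chain
theorem pv_charFix_cons (l x : List Char) (xs : List (List Char)) :
    pvCharFix (l :: x :: xs) = l :: pvCharFix (x :: xs) := by
  unfold pvCharFix
  rw [List.getLast?_cons_cons]
  cases hg : (x :: xs).getLast? with
  | none => rfl
  | some last =>
    by_cases he : PySem.Chars.endswith last ['\n'] = true
    · simp [he]
    · simp [he, List.dropLast_cons₂]

theorem pv_endswith_iff_getLast (l : List Char) (c : Char) :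
    PySem.Chars.endswith l [c] = true ↔ l.getLast? = some c := by
  rw [PySem.Chars.endswith_iff]
  constructor
  · rintro ⟨u, rfl⟩
    simp
  · intro h
    obtain ⟨l', rfl⟩ := List.getLast?_eq_some_iff.mp h
    exact ⟨l', rfl⟩

theorem pv_chain_singleton (l : List Char) : pvChain [l] = pvChunkOk l := by
  simp [pvChain, pvNoLF]

theorem pv_chain_charFix {L : List (List Char)} (h : pvChain' L = true) :
    pvChain (pvCharFix L) = true := by
  induction L with
  | nil => simp [pvCharFix, pvChain]
  | cons l R ih =>
    cases R with
    | nil =>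
      have hlo := pv_chain'_singleton_elim h
      have hne := pvLastOk_ne_nil hlo
      have hbt : pvBody l ++ pvTerm l = l := List.takeWhile_append_dropWhile
      unfold pvCharFix
      simp only [List.getLast?_singleton]
      by_cases he : PySem.Chars.endswith l ['\n'] = true
      · rw [if_pos he, pv_chain_singleton]
        rcases pv_or_elim hlo with hck | hrest
        · exact hck
        · exfalso
          have hsuf : ['\n'] <:+ l := (PySem.Chars.endswith_iff _ _).mp he
          have hmem : '\n' ∈ l := hsuf.subset (by simp)
          have := (List.all_eq_true.mp (pv_and_elim hrest).2) _ hmem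
          exact absurd this (by decide)
      · rw [if_neg he]
        rw [show ([l] : List (List Char)).dropLast ++ [l ++ ['\n']] = [l ++ ['\n']] from by
          rw [pv_dropLast_single]; rfl]
        rw [pv_chain_singleton]
        rcases pv_or_elim hlo with hck | hrest
        · rcases pv_term_cases hck with ht | ht | ht
          · exfalso
            apply he
            rw [pv_endswith_iff_getLast]
            conv_lhs => rw [← hbt, ht]
            simp
          · exfalso
            apply he
            rw [pv_endswith_iff_getLast]
            conv_lhs => rw [← hbt, ht]
            simp
          · have heq : l ++ ['\n'] = pvBody l ++ ['\r', '\n'] := by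
              conv_lhs => rw [← hbt, ht]
              simp
            rw [heq]
            have hterm : pvTerm (pvBody l ++ ['\r', '\n']) = ['\r', '\n'] := by
              unfold pvTerm
              rw [pv_dropWhile_append _ _ _ (pv_body_all l)]
              decide
            simp [pvChunkOk, hterm]
        · have hall : l.all pvNotBrk = true := (pv_and_elim hrest).2
          have hterm : pvTerm (l ++ ['\n']) = ['\n'] := by
            unfold pvTerm
            rw [pv_dropWhile_append _ _ _ hall]
            decide
          simp [pvChunkOk, hterm]
    | cons x xs =>
      obtain ⟨hok, hadj, hch'⟩ := pv_chain'_cons_cons_elim h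
      rw [pv_charFix_cons]
      have hxne : x ≠ [] := pv_chain'_ne_nil hch' x (by simp)
      have hnoeq : pvNoLF (pvCharFix (x :: xs)) = pvNoLF (x :: xs) := by
        cases hxs : xs with
        | nil =>
          unfold pvCharFix
          simp only [List.getLast?_singleton]
          by_cases he : PySem.Chars.endswith x ['\n'] = true
          · simp [he]
          · rw [if_neg he]
            rw [show ([x] : List (List Char)).dropLast ++ [x ++ ['\n']] = [x ++ ['\n']] from by
              rw [pv_dropLast_single]; rfl]
            cases x with
            | nil => exact absurd rfl hxne
            | cons c t => rw [List.cons_append, pvNoLF_cons, pvNoLF_cons]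
        | cons y ys =>
          rw [pv_charFix_cons]
          exact pvNoLF_indep x _ _
      refine pv_chain_cons_intro _ _ hok ?_ (ih hch')
      rw [hnoeq]
      exact hadj

-- pvFixLast over strings is pvCharFix over char lists
theorem pv_fix_bridge (L : List (List Char)) :
    pvFixLast (L.map String.ofList) = (pvCharFix L).map String.ofList := by
  cases hL : L.getLast? with
  | none =>
    have hnil : L = [] := by
      cases L with
      | nil => rfl
      | cons a l => simp at hL
    subst hnil
    rfl
  | some last =>
    unfold pvFixLast pvCharFix
    rw [List.getLast?_map, hL]
    simp only [Option.map_some]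
    rw [show PySem.Str.endswith (String.ofList last) "\n" = PySem.Chars.endswith last ['\n'] from by
      simp [PySem.Str.endswith]]
    by_cases he : PySem.Chars.endswith last ['\n'] = true
    · simp [he]
    · simp only [he, Bool.false_eq_true, if_false]
      simp [List.map_dropLast]

-- last element of an append
theorem pv_getLast?_append {α : Type} (l t : List α) (h : t ≠ []) :
    (l ++ t).getLast? = t.getLast? := by
  induction l with
  | nil => simp
  | cons a l ih =>
    rw [List.cons_append]
    have hne : l ++ t ≠ [] := by
      intro hcon
      exact h (List.append_eq_nil_iff.mp hcon).2
    cases hlt : l ++ t with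
    | nil => exact absurd hlt hne
    | cons b u =>
      rw [List.getLast?_cons_cons, ← hlt]
      exact ih

theorem pv_endswith_append {t : List Char} (l : List Char) (h : t ≠ []) :
    PySem.Chars.endswith (l ++ t) ['\n'] = PySem.Chars.endswith t ['\n'] := by
  rw [Bool.eq_iff_iff, pv_endswith_iff_getLast, pv_endswith_iff_getLast,
      pv_getLast?_append _ _ h]

theorem pv_flatten_charFix {L : List (List Char)} (h : pvChain' L = true) :
    (pvCharFix L).flatten =
      (if !(L.flatten.isEmpty) && !(PySem.Chars.endswith L.flatten ['\n'])
       then L.flatten ++ ['\n'] else L.flatten) := by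
  induction L with
  | nil => simp [pvCharFix]
  | cons l R ih =>
    cases R with
    | nil =>
      have hlo := pv_chain'_singleton_elim h
      have hne := pvLastOk_ne_nil hlo
      have hie : l.isEmpty = false := by simp [hne]
      unfold pvCharFix
      simp only [List.getLast?_singleton]
      by_cases he : PySem.Chars.endswith l ['\n'] = true
      · simp only [List.flatten_cons, List.flatten_nil, List.append_nil]
        rw [if_pos he]
        simp [he]
      · simp only [List.flatten_cons, List.flatten_nil, List.append_nil]
        rw [if_neg he]
        simp [hie, he]
    | cons x xs =>
      obtain ⟨hok, _, hch'⟩ := pv_chain'_cons_cons_elim h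
      have hlne := pv_chunkOk_ne_nil hok
      have hxne : x ≠ [] := pv_chain'_ne_nil hch' x (by simp)
      have hfne : x ++ xs.flatten ≠ [] := by
        intro hcon
        exact hxne (List.append_eq_nil_iff.mp hcon).1
      rw [pv_charFix_cons]
      simp only [List.flatten_cons]
      rw [ih hch']
      simp only [List.flatten_cons]
      have hee : PySem.Chars.endswith (l ++ (x ++ xs.flatten)) ['\n'] =
          PySem.Chars.endswith (x ++ xs.flatten) ['\n'] := pv_endswith_append l hfne
      have hie1 : (l ++ (x ++ xs.flatten)).isEmpty = false := by
        simp [hlne]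
      have hie2 : (x ++ xs.flatten).isEmpty = false := by
        simp [hfne]
      rw [hee, hie1, hie2]
      by_cases hE : PySem.Chars.endswith (x ++ xs.flatten) ['\n'] = true <;>
        simp [hE, List.append_assoc]

-- chunk condition: rstrip ignores the terminator
theorem pv_cond_body {l : List Char} (h : pvChunkOk l = true) :
    pvCond (pvBody l) = pvCond l := by
  have hbt : pvBody l ++ pvTerm l = l := List.takeWhile_append_dropWhile
  have key : PySem.Chars.rstrip l = PySem.Chars.rstrip (pvBody l) := by
    conv_lhs => rw [← hbt]
    unfold PySem.Chars.rstrip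
    rw [List.reverse_append]
    rcases pv_term_cases h with ht | ht | ht <;>
      rw [ht] <;> rw [pv_dropWhile_append _ _ _ (by decide)]
  unfold pvCond
  simp [PySem.Str.rstrip, key]

-- terminator length facts
theorem pvTermLen_lf (t : List Char) : pvTermLen ('\n' :: t) = 1 := by
  simp [pvTermLen]

theorem pvTermLen_crlf (t : List Char) : pvTermLen ('\r' :: '\n' :: t) = 2 := by
  simp [pvTermLen]

theorem pvTermLen_cr_nil : pvTermLen ['\r'] = 1 := by
  simp [pvTermLen]

theorem pvTermLen_cr_cons {c : Char} (t : List Char) (h : ¬(c = '\n')) :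
    pvTermLen ('\r' :: c :: t) = 1 := by
  simp only [pvTermLen]
  split
  · simp_all
  · rfl

-- one scan step consumes exactly one chunk
theorem pv_scan_step (l : List Char) (R : List (List Char)) (pos : Nat) (first : Bool)
    (hok : pvChunkOk l = true) (hch : pvChain R = true)
    (hadj : (!(pvTerm l == ['\r']) || pvNoLF R) = true) :
    pvScanB (l ++ R.flatten) pos first =
      if !first && pvCond l then some pos
      else pvScanB R.flatten (pos + l.length) false := by
  have hbt : pvBody l ++ pvTerm l = l := List.takeWhile_append_dropWhile
  have hband := pv_body_all l
  have hlen : l.length = (pvBody l).length + (pvTerm l).length := by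
    conv_lhs => rw [← hbt]
    simp
  have htw : (l ++ R.flatten).takeWhile pvNotBrk = pvBody l := by
    conv_lhs => rw [← hbt]
    rw [List.append_assoc, pv_takeWhile_append _ _ _ hband]
    rcases pv_term_cases hok with ht | ht | ht <;>
      rw [ht] <;> simp [pvNotBrk_lf, pvNotBrk_cr]
  have hdw : (l ++ R.flatten).dropWhile pvNotBrk = pvTerm l ++ R.flatten := by
    conv_lhs => rw [← hbt]
    rw [List.append_assoc, pv_dropWhile_append _ _ _ hband]
    rcases pv_term_cases hok with ht | ht | ht <;>
      rw [ht] <;> simp [pvNotBrk_lf, pvNotBrk_cr]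
  have hlnil := pv_chunkOk_ne_nil hok
  obtain ⟨a, l', hal⟩ : ∃ a l', l = a :: l' := by
    cases l with
    | nil => exact absurd rfl hlnil
    | cons a l' => exact ⟨a, l', rfl⟩
  have hcons : l ++ R.flatten = a :: (l' ++ R.flatten) := by rw [hal]; rfl
  rw [hcons]
  simp only [pvScanB]
  rw [← hcons, htw, hdw]
  rw [show (PySem.Str.rstrip (String.ofList (pvBody l)) == "---") = pvCond l from pv_cond_body hok]
  by_cases hc : (!first && pvCond l) = true
  · rw [if_pos hc, if_pos hc]
  · rw [if_neg hc, if_neg hc]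
    rcases pv_term_cases hok with ht | ht | ht
    · rw [ht]
      rw [show (['\n'] ++ R.flatten) = '\n' :: R.flatten from rfl, pvTermLen_lf]
      rw [show (('\n' :: R.flatten).drop 1) = R.flatten from rfl]
      have harith : pos + (pvBody l).length + 1 = pos + l.length := by
        rw [hlen, ht]
        simp only [List.length_cons, List.length_nil]
        omega
      rw [harith]
    · rw [ht]
      rw [show (['\r', '\n'] ++ R.flatten) = '\r' :: '\n' :: R.flatten from rfl, pvTermLen_crlf]
      rw [show (('\r' :: '\n' :: R.flatten).drop 2) = R.flatten from rfl]
      have harith : pos + (pvBody l).length + 2 = pos + l.length := by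
        rw [hlen, ht]
        simp only [List.length_cons, List.length_nil]
        omega
      rw [harith]
    · rw [ht]
      have harith : pos + (pvBody l).length + 1 = pos + l.length := by
        rw [hlen, ht]
        simp only [List.length_cons, List.length_nil]
        omega
      cases R with
      | nil =>
        simp only [List.flatten_nil, List.append_nil]
        rw [pvTermLen_cr_nil]
        rw [show ((['\r'] : List Char).drop 1) = ([] : List Char) from rfl]
        rw [harith]
      | cons r R' =>
        have hNo : pvNoLF (r :: R') = true := by
          rcases pv_or_elim hadj with hx | hx
          · rw [ht] at hx; exact absurd hx (by decide)
          · exact hx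
        have hrne : r ≠ [] := pv_chain_ne_nil hch r (by simp)
        obtain ⟨rc, rt, rfl⟩ : ∃ rc rt, r = rc :: rt := by
          cases r with
          | nil => exact absurd rfl hrne
          | cons rc rt => exact ⟨rc, rt, rfl⟩
        have hrc : ¬(rc = '\n') := by
          intro e
          rw [pvNoLF_cons, e] at hNo
          simp at hNo
        have e1 : ['\r'] ++ ((rc :: rt) :: R').flatten = '\r' :: rc :: (rt ++ R'.flatten) := by
          simp
        rw [e1, pvTermLen_cr_cons _ hrc]
        rw [show (('\r' :: rc :: (rt ++ R'.flatten)).drop 1) = rc :: (rt ++ R'.flatten) from rfl]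
        rw [show (rc :: (rt ++ R'.flatten)) = ((rc :: rt) :: R').flatten from by simp]
        rw [harith]

theorem pv_scan_chain (L : List (List Char)) : ∀ pos, pvChain L = true →
    pvScanB L.flatten pos false =
      (List.findIdx? pvCond L).map (fun j => pos + ((L.take j).flatten).length) := by
  induction L with
  | nil => intro pos h; simp [pvScanB]
  | cons l R ih =>
    intro pos h
    obtain ⟨hok, hadj, hchR⟩ := pv_chain_cons_elim h
    rw [List.flatten_cons, pv_scan_step l R pos false hok hchR hadj]
    simp only [Bool.not_false, Bool.true_and]
    cases hcv : pvCond l with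
    | true =>
      rw [List.findIdx?_cons, hcv]
      simp
    | false =>
      rw [List.findIdx?_cons, hcv]
      simp only [Bool.false_eq_true, if_false]
      rw [ih (pos + l.length) hchR]
      cases hf : List.findIdx? pvCond R with
      | none => simp
      | some j =>
        simp only [Option.map_some]
        congr 1
        simp only [List.take_succ_cons, List.flatten_cons, List.length_append]
        omega

-- splitlines is a left inverse of flatten on chains
theorem pv_consume (body : List Char) : ∀ (cs acc : List Char), body.all pvNotBrk = true →
    pvSplitKeepAux acc (body ++ cs) = pvSplitKeepAux (body.reverse ++ acc) cs := by
  induction body with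
  | nil => intro cs acc _; simp
  | cons b bs ih =>
    intro cs acc hall
    simp only [List.all_cons, Bool.and_eq_true] at hall
    obtain ⟨hb, hbs⟩ := hall
    have hb1 : ¬(b = '\n') := by intro e; subst e; exact absurd hb (by decide)
    have hb2 : ¬(b = '\r') := by intro e; subst e; exact absurd hb (by decide)
    rw [List.cons_append, pv_splitAux_other _ _ hb1 hb2, ih _ _ hbs]
    congr 1
    simp

theorem pv_splitAux_of_chain (L : List (List Char)) (h : pvChain L = true) :
    pvSplitKeepAux [] L.flatten = L := by
  induction L with
  | nil => simp [pvSplitKeepAux]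
  | cons l R ih =>
    obtain ⟨hok, hadj, hchR⟩ := pv_chain_cons_elim h
    have hbt : pvBody l ++ pvTerm l = l := List.takeWhile_append_dropWhile
    have hstep : pvSplitKeepAux [] ((l :: R).flatten) =
        pvSplitKeepAux ((pvBody l).reverse) (pvTerm l ++ R.flatten) := by
      conv_lhs => rw [List.flatten_cons, ← hbt, List.append_assoc]
      rw [pv_consume _ _ _ (pv_body_all l), List.append_nil]
    rw [hstep]
    rcases pv_term_cases hok with ht | ht | ht
    · rw [ht]
      rw [show (['\n'] ++ R.flatten) = '\n' :: R.flatten from rfl, pv_splitAux_lf, ih hchR]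
      rw [List.reverse_reverse]
      congr 1
      conv_rhs => rw [← hbt, ht]
    · rw [ht]
      rw [show (['\r', '\n'] ++ R.flatten) = '\r' :: '\n' :: R.flatten from rfl,
          pv_splitAux_crlf, ih hchR]
      rw [List.reverse_reverse]
      congr 1
      conv_rhs => rw [← hbt, ht]
    · rw [ht]
      cases R with
      | nil =>
        simp only [List.flatten_nil, List.append_nil]
        rw [pv_splitAux_cr_nil, List.reverse_reverse]
        congr 1
        conv_rhs => rw [← hbt, ht]
      | cons r R' =>
        have hNo : pvNoLF (r :: R') = true := by
          rcases pv_or_elim hadj with hx | hx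
          · rw [ht] at hx; exact absurd hx (by decide)
          · exact hx
        have hrne : r ≠ [] := pv_chain_ne_nil hchR r (by simp)
        obtain ⟨rc, rt, rfl⟩ : ∃ rc rt, r = rc :: rt := by
          cases r with
          | nil => exact absurd rfl hrne
          | cons rc rt => exact ⟨rc, rt, rfl⟩
        have hrc : ¬(rc = '\n') := by
          intro e
          rw [pvNoLF_cons, e] at hNo
          simp at hNo
        have e1 : ['\r'] ++ ((rc :: rt) :: R').flatten = '\r' :: rc :: (rt ++ R'.flatten) := by
          simp
        rw [e1, pv_splitAux_cr_cons _ _ hrc]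
        rw [show (rc :: (rt ++ R'.flatten)) = ((rc :: rt) :: R').flatten from by simp]
        rw [ih hchR, List.reverse_reverse]
        congr 1
        conv_rhs => rw [← hbt, ht]

-- the format block is a chain of good chunks and can be inserted at any chunk boundary
theorem pv_fmt_eq : pvFmtChunks =
    [['f','o','r','m','a','t',':','\n'],
     [' ',' ',' ',' ','h','t','m','l',':',' ','d','e','f','a','u','l','t','\n'],
     [' ',' ',' ',' ','i','p','y','n','b',':',' ','d','e','f','a','u','l','t','\n']] := by
  decide

theorem pv_noLF_fmt (X : List (List Char)) : pvNoLF (pvFmtChunks ++ X) = true := by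
  rw [pv_fmt_eq]
  rfl

theorem pv_chain_fmt : pvChain pvFmtChunks = true := by decide

theorem pv_fmt_last : (pvFmtChunks.getLast?.all (fun l => !(pvTerm l == ['\r']))) = true := by
  decide

theorem pv_chain_append_of (L : List (List Char)) (hL : pvChain L = true) :
    ∀ F, pvChain F = true → (F.getLast?.all (fun l => !(pvTerm l == ['\r']))) = true →
      pvChain (F ++ L) = true := by
  intro F
  induction F with
  | nil => intro _ _; simpa using hL
  | cons f F' ih =>
    intro hF hlast
    obtain ⟨hokf, hadjf, hchF'⟩ := pv_chain_cons_elim hF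
    cases F' with
    | nil =>
      simp only [List.getLast?_singleton, Option.all_some] at hlast
      rw [show ([f] ++ L) = f :: L from rfl]
      exact pv_chain_cons_intro _ _ hokf (by simp [hlast]) hL
    | cons g F'' =>
      have hlast' : ((g :: F'').getLast?.all (fun l => !(pvTerm l == ['\r']))) = true := by
        rwa [List.getLast?_cons_cons] at hlast
      have hrec := ih hchF' hlast'
      rw [show ((f :: g :: F'') ++ L) = f :: ((g :: F'') ++ L) from rfl]
      refine pv_chain_cons_intro _ _ hokf ?_ hrec
      rcases pv_or_elim hadjf with hx | hx
      · simp [hx]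
      · rw [show ((g :: F'') ++ L) = g :: (F'' ++ L) from rfl,
            pvNoLF_indep g (F'' ++ L) F'']
        simp [hx]

theorem pv_insert_chain (L : List (List Char)) (i : Nat) (h : pvChain L = true) :
    pvChain (L.take i ++ pvFmtChunks ++ L.drop i) = true := by
  induction L generalizing i with
  | nil =>
    simp only [List.take_nil, List.drop_nil, List.nil_append, List.append_nil]
    exact pv_chain_append_of [] rfl pvFmtChunks pv_chain_fmt pv_fmt_last
  | cons l R ih =>
    obtain ⟨hok, hadj, hchR⟩ := pv_chain_cons_elim h
    cases i with
    | zero =>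
      simp only [List.take_zero, List.drop_zero, List.nil_append]
      exact pv_chain_append_of _ h pvFmtChunks pv_chain_fmt pv_fmt_last
    | succ k =>
      simp only [List.take_succ_cons, List.drop_succ_cons, List.cons_append]
      refine pv_chain_cons_intro _ _ hok ?_ (ih k hchR)
      rcases pv_or_elim hadj with hx | hx
      · simp [hx]
      · have hno : pvNoLF (R.take k ++ pvFmtChunks ++ R.drop k) = true := by
          cases R with
          | nil =>
            simp only [List.take_nil, List.drop_nil, List.nil_append]
            exact pv_noLF_fmt _
          | cons r R' =>
            cases k with
            | zero =>
              simp only [List.take_zero, List.nil_append]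
              exact pv_noLF_fmt _
            | succ m =>
              simp only [List.take_succ_cons, List.cons_append]
              rw [pvNoLF_indep r _ R']
              exact hx
        rw [Bool.or_eq_true]
        exact Or.inr hno

-- ============ A-side loop characterisation ============
theorem pvLoopA_true (rest acc : List String) :
    pvLoopA rest acc true = (acc ++ rest, true) := by
  induction rest generalizing acc with
  | nil => simp [pvLoopA]
  | cons l rest ih => simp [pvLoopA, ih]

theorem pvLoopA_false (rest : List String) :
    ∀ acc : List String, acc ≠ [] →
    pvLoopA rest acc false =
      match List.findIdx? (fun l => PySem.Str.rstrip l == "---") rest with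
      | none => (acc ++ rest, false)
      | some j => (acc ++ rest.take j ++ pvFormatLines ++ rest.drop j, true) := by
  induction rest with
  | nil => intro acc _; simp [pvLoopA]
  | cons l rest ih =>
    intro acc hacc
    have hne : acc.isEmpty = false := by
      cases acc with
      | nil => exact absurd rfl hacc
      | cons a as => rfl
    by_cases hc : (PySem.Str.rstrip l == "---") = true
    · rw [List.findIdx?_cons, hc]
      simp [pvLoopA, hc, hne, pvLoopA_true]
    · have hc' : (PySem.Str.rstrip l == "---") = false := by simpa using hc
      have hstep : pvLoopA (l :: rest) acc false = pvLoopA rest (acc ++ [l]) false := by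
        simp [pvLoopA, hc']
      rw [hstep, ih (acc ++ [l]) (by simp), List.findIdx?_cons, hc']
      simp only [Bool.false_eq_true, if_false]
      cases h : List.findIdx? (fun l => PySem.Str.rstrip l == "---") rest with
      | none => simp
      | some j => simp

theorem pvLoopA_start (s0 : String) (restS : List String) :
    pvLoopA (s0 :: restS) [] false = pvLoopA restS [s0] false := by
  simp [pvLoopA]

-- ============ string-level bridges ============
theorem pv_beq_empty (s : String) : (s == "") = s.toList.isEmpty := by
  rw [Bool.eq_iff_iff, beq_iff_eq, List.isEmpty_iff]
  constructor
  · intro h; subst h; decide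
  · intro h
    have := congrArg String.ofList h
    simpa using this

theorem pv_mapfmt : pvFmtChunks.map String.ofList = pvFormatLines := by decide

-- ============ main equivalence ============
theorem pv_main (src : List String) :
    add_format_to_frontmatter src = add_format_to_frontmatter_alt src := by
  by_cases hg : (PySem.Str.isIn "\nformat:" (PySem.Str.join "" src)
      || PySem.Str.startswith (PySem.Str.join "" src) "format:") = true
  · simp only [add_format_to_frontmatter, add_format_to_frontmatter_alt]
    rw [if_pos hg, if_pos hg]
  · simp only [add_format_to_frontmatter, add_format_to_frontmatter_alt]
    rw [if_neg hg, if_neg hg]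
    have hflat : (pvSplitKeepAux [] (PySem.Str.join "" src).toList).flatten
        = (PySem.Str.join "" src).toList := by
      simpa using pv_flatten_splitAux [] (PySem.Str.join "" src).toList
    have hch' : pvChain' (pvSplitKeepAux [] (PySem.Str.join "" src).toList) = true :=
      pv_chain'_splitAux [] (PySem.Str.join "" src).toList rfl
    have hCF : pvChain (pvCharFix (pvSplitKeepAux [] (PySem.Str.join "" src).toList)) = true :=
      pv_chain_charFix hch'
    have hfixmap : pvFixLast (pvSplitKeep (PySem.Str.join "" src)) =
        (pvCharFix (pvSplitKeepAux [] (PySem.Str.join "" src).toList)).map String.ofList := by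
      unfold pvSplitKeep
      exact pv_fix_bridge _
    have hend : PySem.Str.endswith (PySem.Str.join "" src) "\n"
        = PySem.Chars.endswith (PySem.Str.join "" src).toList ['\n'] := by
      simp [PySem.Str.endswith]
    have htext : (if !(PySem.Str.join "" src == "") && !(PySem.Str.endswith (PySem.Str.join "" src) "\n")
          then String.ofList ((PySem.Str.join "" src).toList ++ ['\n']) else PySem.Str.join "" src).toList
        = (pvCharFix (pvSplitKeepAux [] (PySem.Str.join "" src).toList)).flatten := by
      rw [pv_flatten_charFix hch', hflat, pv_beq_empty, hend]
      by_cases h1 : ((!(PySem.Str.join "" src).toList.isEmpty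
          && !(PySem.Chars.endswith (PySem.Str.join "" src).toList ['\n']))) = true
      · rw [if_pos h1, if_pos h1]; simp
      · rw [if_neg h1, if_neg h1]
    rw [hfixmap, htext]
    cases hCFe : pvCharFix (pvSplitKeepAux [] (PySem.Str.join "" src).toList) with
    | nil =>
      simp [pvLoopA, pvScanB]
    | cons l0 R =>
      rw [hCFe] at hCF
      obtain ⟨hok, hadj, hchR⟩ := pv_chain_cons_elim hCF
      have hBscan : pvScanB ((l0 :: R).flatten) 0 true =
          (List.findIdx? pvCond R).map (fun j => l0.length + ((R.take j).flatten).length) := by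
        rw [List.flatten_cons, pv_scan_step l0 R 0 true hok hchR hadj]
        simp only [Bool.not_true, Bool.false_and, Bool.false_eq_true, if_false]
        rw [pv_scan_chain R (0 + l0.length) hchR]
        simp
      have hAloop : pvLoopA ((l0 :: R).map String.ofList) [] false =
          match List.findIdx? pvCond R with
          | none => ([String.ofList l0] ++ R.map String.ofList, false)
          | some j => ([String.ofList l0] ++ (R.map String.ofList).take j ++ pvFormatLines
                        ++ (R.map String.ofList).drop j, true) := by
        rw [List.map_cons, pvLoopA_start, pvLoopA_false _ _ (by simp)]
        rw [List.findIdx?_map]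
        rfl
      rw [hAloop, hBscan]
      cases hf : List.findIdx? pvCond R with
      | none => simp
      | some j =>
        simp only [Option.map_some, Bool.not_true, Bool.false_eq_true, if_false]
        have hp : l0.length + ((R.take j).flatten).length = (((l0 :: R).take (j+1)).flatten).length := by
          simp [List.take_succ_cons]
        have hsplit : (l0 :: R).flatten =
            (((l0 :: R).take (j+1)).flatten) ++ (((l0 :: R).drop (j+1)).flatten) := by
          rw [← List.flatten_append, List.take_append_drop]
        have htake : ((l0 :: R).flatten).take (l0.length + ((R.take j).flatten).length)
            = ((l0 :: R).take (j+1)).flatten := by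
          rw [hp]
          conv_lhs => rw [hsplit]
          exact List.take_left
        have hdrop : ((l0 :: R).flatten).drop (l0.length + ((R.take j).flatten).length)
            = ((l0 :: R).drop (j+1)).flatten := by
          rw [hp]
          conv_lhs => rw [hsplit]
          exact List.drop_left
        have hfmtc : pvFormatBlock.toList = pvFmtChunks.flatten := by decide
        have hins := pv_insert_chain (l0 :: R) (j+1) hCF
        have hsplitkeep : pvSplitKeep (String.ofList
              ((((l0 :: R).flatten).take (l0.length + ((R.take j).flatten).length))
                ++ pvFormatBlock.toList
                ++ (((l0 :: R).flatten).drop (l0.length + ((R.take j).flatten).length))))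
            = [String.ofList l0] ++ (R.map String.ofList).take j ++ pvFormatLines
                ++ (R.map String.ofList).drop j := by
          rw [htake, hdrop, hfmtc]
          unfold pvSplitKeep
          rw [show (String.ofList ((((l0 :: R).take (j+1)).flatten ++ pvFmtChunks.flatten
                ++ (((l0 :: R).drop (j+1)).flatten)))).toList
              = (((l0 :: R).take (j+1)) ++ pvFmtChunks ++ ((l0 :: R).drop (j+1))).flatten from by
                simp [List.flatten_append]]
          rw [pv_splitAux_of_chain _ hins]
          simp [List.take_succ_cons, List.drop_succ_cons, List.map_take, List.map_drop, pv_mapfmt]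
        rw [hsplitkeep]

-- ===== VERDICT (by name: the statement is the Claim_ definition above) =====
theorem add_format_to_frontmatter_spec : Claim_equal_add_format_to_frontmatter := by
  intro source_lines _
  unfold Spec_add_format_to_frontmatter
  exact pv_main source_lines
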